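-- pv_equiv track=rewrite | github.com/astorguy/sw_pwr_book_sim | python/py4spice/sim_results2.py | _find_duplicate_indexes
-- ===== SOURCE A (Python) =====
-- def _find_duplicate_indexes(strings: list[str]) -> list[int]:
--     """determine which indices are duplicates
--
--     Args:
--         strings (list[str]): simulation text data in
--
--     Returns:
--         list[int]: simulation text data in
--     """
--     duplicate_indexes: list[int] = []
--     seen: set[str] = set()
--
--     for i, string in enumerate(strings):
--         if string in seen:
--             duplicate_indexes.append(i)
--         else:
--             seen.add(string)
--
--     return duplicate_indexes
-- ===== SOURCE B (Python) =====
-- def _find_duplicate_indexes(strings: list[str]) -> list[int]: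
--     """determine which indices are duplicates (grouping re-implementation)"""
--     positions: dict[str, list[int]] = {}
--     for i, string in enumerate(strings):
--         positions.setdefault(string, []).append(i)
--     result: list[int] = []
--     for idxs in positions.values():
--         result.extend(idxs[1:])
--     return sorted(result)
-- ===== Notes on version B (the rewrite author's own statement) =====
-- stated objective: alternative
-- what changed: B groups all positions per string in one dict pass, collects every group's tail (occurrences after the first) and sorts, instead of A's streaming seen-set filter.
import Mathlib
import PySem

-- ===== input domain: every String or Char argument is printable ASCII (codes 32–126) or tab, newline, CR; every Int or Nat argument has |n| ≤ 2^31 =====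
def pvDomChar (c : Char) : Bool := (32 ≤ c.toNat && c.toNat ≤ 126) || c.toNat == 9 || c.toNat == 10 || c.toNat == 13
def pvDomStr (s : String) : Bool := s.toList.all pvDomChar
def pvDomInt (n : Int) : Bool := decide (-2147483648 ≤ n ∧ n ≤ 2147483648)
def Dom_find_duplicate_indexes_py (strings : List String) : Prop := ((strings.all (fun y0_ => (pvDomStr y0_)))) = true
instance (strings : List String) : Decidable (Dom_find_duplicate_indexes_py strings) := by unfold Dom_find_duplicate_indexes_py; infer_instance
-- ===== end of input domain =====

-- B groups all positions per string in a dict, emits each group's tail and sorts,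
-- instead of A's streaming seen-set filter; alternative decomposition, same results.


-- ===== PORT A =====
def find_duplicate_indexes_py (strings : List String) : List Int :=
  -- duplicate_indexes = []; seen = set(); for i, string in enumerate(strings): …
  ((PySem.List.enumerate strings 0).foldl
    (fun (st : List Int × PySem.Set String) p =>
      if st.2.contains p.2 then (st.1 ++ [p.1], st.2) else (st.1, PySem.Set.add st.2 p.2))
    ([], PySem.Set.empty)).1

-- ===== PORT B =====
def find_duplicate_indexes_py_alt (strings : List String) : List Int :=
  -- positions.setdefault(string, []).append(i)  ==  positions[string] = positions.get(string, []) + [i]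
  let positions : PySem.Dict String (List Int) :=
    (PySem.List.enumerate strings 0).foldl
      (fun d p => d.modify p.2 [] (fun l => l ++ [p.1])) PySem.Dict.empty
  -- for idxs in positions.values(): result.extend(idxs[1:])
  let result : List Int :=
    positions.values.foldl (fun acc idxs => acc ++ PySem.List.slice idxs (some 1) none) []
  PySem.List.sorted result (fun x => x) false

-- ===== PRECONDITION & SPEC =====
def Spec_find_duplicate_indexes_py (strings : List String) (out : List Int) : Prop := out = find_duplicate_indexes_py_alt strings
instance (strings : List String) (out : List Int) : Decidable (Spec_find_duplicate_indexes_py strings out) := by unfold Spec_find_duplicate_indexes_py; infer_instance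

-- ===== CLAIM (what is proved, stated in full; the proofs are below) =====
def Claim_equal_find_duplicate_indexes_py : Prop := ∀ (strings : List String), Dom_find_duplicate_indexes_py strings → Spec_find_duplicate_indexes_py strings (find_duplicate_indexes_py strings)

-- ===== LEMMAS AND PROOFS =====

/-- A's loop, as structural recursion: emit index `s` when the head was already seen. -/
def dupFrom : List String → Int → PySem.Set String → List Int
  | [], _, _ => []
  | x :: xs, s, seen =>
      (if seen.contains x then [s] else []) ++ dupFrom xs (s + 1) (PySem.Set.add seen x)

lemma A_fold (xs : List String) (s : Int) (st : List Int × PySem.Set String) :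
    (List.foldl
      (fun (st : List Int × PySem.Set String) p =>
        if st.2.contains p.2 then (st.1 ++ [p.1], st.2) else (st.1, PySem.Set.add st.2 p.2))
      st (PySem.List.enumerate xs s)).1 = st.1 ++ dupFrom xs s st.2 := by
  induction xs generalizing s st with
  | nil => simp [PySem.List.enumerate_nil, dupFrom]
  | cons x xs ih =>
    rw [PySem.List.enumerate_cons, List.foldl_cons, ih]
    by_cases h : st.2.contains x
    · have hx : x ∈ st.2 := (PySem.Set.contains_iff st.2 x).1 h
      simp [dupFrom, PySem.Set.add, hx]
    · have hx : x ∉ st.2 := fun m => h ((PySem.Set.contains_iff st.2 x).2 m)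
      simp [dupFrom, PySem.Set.add, hx]

lemma dup_ge (xs : List String) (s : Int) (seen : PySem.Set String) :
    ∀ i ∈ dupFrom xs s seen, s ≤ i := by
  induction xs generalizing s seen with
  | nil => simp [dupFrom]
  | cons x xs ih =>
    intro i hi
    simp only [dupFrom, List.mem_append] at hi
    rcases hi with hi | hi
    · split at hi <;> simp_all
    · have := ih (s + 1) (PySem.Set.add seen x) i hi; omega

lemma dup_pairwise (xs : List String) (s : Int) (seen : PySem.Set String) :
    (dupFrom xs s seen).Pairwise (· < ·) := by
  induction xs generalizing s seen with
  | nil => simp [dupFrom]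
  | cons x xs ih =>
    simp only [dupFrom]
    apply List.pairwise_append.2
    refine ⟨by split <;> simp, ih _ _, ?_⟩
    intro a ha b hb
    have hb' := dup_ge xs (s + 1) (PySem.Set.add seen x) b hb
    split at ha <;> simp_all

lemma dup_mem (xs : List String) (s : Int) (seen : PySem.Set String) (i : Int) :
    i ∈ dupFrom xs s seen ↔
      ∃ (j : Nat), ∃ h : j < xs.length, i = s + j ∧ (xs[j] ∈ seen ∨ xs[j] ∈ xs.take j) := by
  induction xs generalizing s seen with
  | nil => simp [dupFrom]
  | cons x xs ih =>
    simp only [dupFrom, List.mem_append, ih, PySem.Set.mem_add]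
    constructor
    · rintro (hi | ⟨j, hj, rfl, hor⟩)
      · by_cases h : seen.contains x
        · rw [if_pos h] at hi
          simp only [List.mem_singleton] at hi
          subst hi
          exact ⟨0, by simp, by simp, Or.inl ((PySem.Set.contains_iff seen x).1 h)⟩
        · rw [if_neg h] at hi
          simp at hi
      · refine ⟨j + 1, by simpa using hj, by push_cast; ring, ?_⟩
        simp only [List.getElem_cons_succ, List.take_succ_cons, List.mem_cons]
        tauto
    · rintro ⟨j, hj, rfl, hor⟩
      match j with
      | 0 =>
        left
        simp only [List.getElem_cons_zero, List.take_zero, List.not_mem_nil, or_false] at hor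
        have h : seen.contains x = true := (PySem.Set.contains_iff seen x).2 hor
        simp [hor]
      | j + 1 =>
        right
        refine ⟨j, by simpa using hj, by push_cast; ring, ?_⟩
        simp only [List.getElem_cons_succ, List.take_succ_cons, List.mem_cons] at hor
        tauto

/-- Indices of the occurrences of `k` in `strings`. -/
def occ (strings : List String) (k : String) : List Int :=
  ((PySem.List.enumerate strings 0).filter (fun p => p.2 == k)).map (·.1)

lemma mem_occ (strings : List String) (k : String) (i : Int) :
    i ∈ occ strings k ↔ ∃ (j : Nat), ∃ h : j < strings.length, i = j ∧ strings[j] = k := by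
  simp only [occ, List.mem_map, List.mem_filter, PySem.List.mem_enumerate_iff]
  constructor
  · rintro ⟨p, ⟨⟨j, hj, rfl⟩, hk⟩, rfl⟩
    exact ⟨j, hj, by simp, by simpa using hk⟩
  · rintro ⟨j, hj, rfl, hk⟩
    exact ⟨((j : Int), strings[j]), ⟨⟨j, hj, by simp⟩, by simpa using hk⟩, rfl⟩

lemma occ_pairwise (strings : List String) (k : String) :
    (occ strings k).Pairwise (· < ·) := by
  apply List.Pairwise.map
  · exact fun a b h => h
  · exact (PySem.List.pairwise_lt_enumerate strings 0).filter _

lemma mem_tail_of_pairwise (xs : List Int) (h : xs.Pairwise (· < ·)) (i : Int) :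
    i ∈ xs.drop 1 ↔ i ∈ xs ∧ ∃ j ∈ xs, j < i := by
  cases xs with
  | nil => simp
  | cons x t =>
    simp only [List.drop_succ_cons, List.drop_zero, List.mem_cons, List.pairwise_cons] at *
    constructor
    · intro hi
      exact ⟨Or.inr hi, x, Or.inl rfl, h.1 i hi⟩
    · rintro ⟨hi, j, hj, hji⟩
      rcases hi with rfl | hi
      · exfalso
        rcases hj with rfl | hj
        · omega
        · have := h.1 j hj; omega
      · exact hi

/-- B's result before sorting, in flatMap form. -/
def Rlist (strings : List String) : List Int :=
  (PySem.Set.ofList strings).flatMap (fun k => (occ strings k).drop 1)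

lemma mem_Rlist (strings : List String) (i : Int) :
    i ∈ Rlist strings ↔
      ∃ (j : Nat), ∃ h : j < strings.length, i = j ∧ strings[j] ∈ strings.take j := by
  simp only [Rlist, List.mem_flatMap, PySem.Set.mem_ofList]
  constructor
  · rintro ⟨k, hk, hi⟩
    rw [mem_tail_of_pairwise _ (occ_pairwise strings k)] at hi
    obtain ⟨hio, j', hj', hlt⟩ := hi
    obtain ⟨j, hj, rfl, hsk⟩ := (mem_occ strings k i).1 hio
    obtain ⟨m, hm, rfl, hmk⟩ := (mem_occ strings k j').1 hj'
    refine ⟨j, hj, rfl, ?_⟩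
    have hmj : m < j := by exact_mod_cast hlt
    have h1 : m < (strings.take j).length := by simp; omega
    have h2 : (strings.take j)[m] = strings[m] := List.getElem_take
    rw [hsk, ← hmk, ← h2]
    exact List.getElem_mem h1
  · rintro ⟨j, hj, rfl, hmem⟩
    obtain ⟨m, hm, hme⟩ := List.getElem_of_mem hmem
    have hml : m < j := by simp at hm; omega
    have hmlen : m < strings.length := by simp at hm; omega
    rw [List.getElem_take] at hme
    refine ⟨strings[j], List.getElem_mem hj, ?_⟩
    rw [mem_tail_of_pairwise _ (occ_pairwise strings _)]
    refine ⟨(mem_occ _ _ _).2 ⟨j, hj, rfl, rfl⟩, (m : Int), (mem_occ _ _ _).2 ⟨m, hmlen, rfl, hme⟩, by exact_mod_cast hml⟩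

lemma nodup_flatMap_of {α β : Type} (l : List α) (f : α → List β) (hl : l.Nodup)
    (hf : ∀ a ∈ l, (f a).Nodup)
    (hd : ∀ a ∈ l, ∀ b ∈ l, a ≠ b → ∀ x ∈ f a, x ∉ f b) :
    (l.flatMap f).Nodup := by
  induction l with
  | nil => simp
  | cons a l ih =>
    simp only [List.flatMap_cons, List.nodup_cons] at *
    apply List.Nodup.append (hf a (List.mem_cons_self)) (ih hl.2 (fun b hb => hf b (List.mem_cons_of_mem _ hb)) ?_) ?_
    · intro b hb c hc hbc x hx
      exact hd b (List.mem_cons_of_mem _ hb) c (List.mem_cons_of_mem _ hc) hbc x hx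
    · intro x hx hx'
      simp only [List.mem_flatMap] at hx'
      obtain ⟨b, hb, hxb⟩ := hx'
      exact hd a (List.mem_cons_self) b (List.mem_cons_of_mem _ hb) (fun h => hl.1 (h ▸ hb)) x hx hxb

lemma nodup_Rlist (strings : List String) : (Rlist strings).Nodup := by
  apply nodup_flatMap_of
  · exact PySem.Set.nodup_ofList strings
  · intro k _
    exact List.Pairwise.imp (fun h => ne_of_lt h) (List.Pairwise.drop (occ_pairwise strings k))
  · intro a _ b _ hab x hxa hxb
    have ha := (List.mem_of_mem_drop hxa)
    have hb := (List.mem_of_mem_drop hxb)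
    obtain ⟨j, hj, hxe, hja⟩ := (mem_occ strings a x).1 ha
    obtain ⟨j', hj', hxe', hjb⟩ := (mem_occ strings b x).1 hb
    have hje : j = j' := by exact_mod_cast hxe.symm.trans hxe'
    subst hje
    exact hab (by rw [← hja, ← hjb])

lemma A_eq_dup (strings : List String) :
    find_duplicate_indexes_py strings = dupFrom strings 0 PySem.Set.empty := by
  unfold find_duplicate_indexes_py
  rw [A_fold]
  simp

lemma B_eq_sorted_Rlist (strings : List String) :
    find_duplicate_indexes_py_alt strings
      = PySem.List.sorted (Rlist strings) (fun x => x) false := by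
  have hmapfst : ((PySem.List.enumerate strings 0).map (fun p => (p.2, p.1))).map (·.1)
      = strings := by
    rw [List.map_map]
    exact PySem.List.map_snd_enumerate strings 0
  have hpos :
      (PySem.List.enumerate strings 0).foldl
        (fun d p => d.modify p.2 [] (fun l => l ++ [p.1])) PySem.Dict.empty
      = ((PySem.List.enumerate strings 0).map (fun p => (p.2, p.1))).foldl
          (fun d q => d.modify q.1 [] (fun l => l ++ [q.2])) PySem.Dict.empty := by
    rw [List.foldl_map]
  have hkeys : (((PySem.List.enumerate strings 0).map (fun p => (p.2, p.1))).foldl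
      (fun d q => d.modify q.1 [] (fun l => l ++ [q.2])) PySem.Dict.empty).keys
      = PySem.Set.ofList strings := by
    rw [PySem.Dict.keys_foldl_modify_key]
    simp [hmapfst, PySem.Set.update, PySem.Set.ofList_eq_foldl]
  have hnd : (((PySem.List.enumerate strings 0).map (fun p => (p.2, p.1))).foldl
      (fun d q => d.modify q.1 [] (fun l => l ++ [q.2])) PySem.Dict.empty).keys.Nodup := by
    rw [hkeys]; exact PySem.Set.nodup_ofList strings
  have hgetD : ∀ k, (((PySem.List.enumerate strings 0).map (fun p => (p.2, p.1))).foldl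
      (fun d q => d.modify q.1 [] (fun l => l ++ [q.2])) PySem.Dict.empty).getD k []
      = occ strings k := by
    intro k
    rw [PySem.Dict.getD_foldl_modify_append]
    simp only [PySem.Dict.getD, PySem.Dict.get?, PySem.Dict.empty, occ,
      List.filter_map, List.map_map]
    simp [Function.comp_def]
  have hvals : (((PySem.List.enumerate strings 0).map (fun p => (p.2, p.1))).foldl
      (fun d q => d.modify q.1 [] (fun l => l ++ [q.2])) PySem.Dict.empty).values
      = (PySem.Set.ofList strings).map (fun k => occ strings k) := by
    rw [PySem.Dict.values_eq_map_keys _ hnd [], hkeys]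
    exact List.map_congr_left (fun k _ => hgetD k)
  unfold find_duplicate_indexes_py_alt
  show PySem.List.sorted
      (((PySem.List.enumerate strings 0).foldl
          (fun d p => d.modify p.2 [] (fun l => l ++ [p.1])) PySem.Dict.empty).values.foldl
        (fun acc idxs => acc ++ PySem.List.slice idxs (some 1) none) [])
      (fun x => x) false
      = PySem.List.sorted (Rlist strings) (fun x => x) false
  rw [hpos, hvals]
  congr 1
  rw [PySem.List.foldl_append_eq_flatMap]
  simp only [List.nil_append, List.flatMap_map]
  unfold Rlist
  simp [PySem.List.slice_from_one, List.drop_one]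

lemma perm_dup_Rlist (strings : List String) :
    (dupFrom strings 0 PySem.Set.empty).Perm (Rlist strings) := by
  rw [List.perm_ext_iff_of_nodup
    ((dup_pairwise strings 0 PySem.Set.empty).imp (fun h => ne_of_lt h))
    (nodup_Rlist strings)]
  intro i
  rw [dup_mem, mem_Rlist]
  constructor
  · rintro ⟨j, hj, rfl, hor⟩
    refine ⟨j, hj, by simp, ?_⟩
    rcases hor with h | h
    · simp [PySem.Set.empty] at h
    · exact h
  · rintro ⟨j, hj, rfl, h⟩
    exact ⟨j, hj, by simp, Or.inr h⟩

-- ===== VERDICT (by name: the statement is the Claim_ definition above) =====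
theorem find_duplicate_indexes_py_spec : Claim_equal_find_duplicate_indexes_py := by
  intro strings _
  unfold Spec_find_duplicate_indexes_py
  rw [A_eq_dup, B_eq_sorted_Rlist]
  exact (PySem.List.sorted_eq_of_perm_of_pairwise_lt _ _ (fun x => x)
    (perm_dup_Rlist strings) (dup_pairwise strings 0 PySem.Set.empty)).symm
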